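-- pv_equiv track=rewrite | github.com/tcatsuko/AoC2023 | aoc11.py | get_col_expansion
-- ===== SOURCE A (Python) =====
-- def get_col_expansion(galaxy1, galaxy2, empty_columns):
--     col_expansion = 0
--     x1 = galaxy1[0]
--     x2 = galaxy2[0]
--     if x2 > x1:
--         for x in range(x1, x2 + 1):
--             if x in empty_columns:
--                 col_expansion += 1
--     elif x1 > x2:
--         for x in range(x2, x1 + 1):
--             if x in empty_columns:
--                 col_expansion += 1
--     return col_expansion
-- ===== SOURCE B (Python) =====
-- def get_col_expansion(galaxy1, galaxy2, empty_columns):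
--     x1 = galaxy1[0]
--     x2 = galaxy2[0]
--     if x1 == x2:
--         return 0
--     lo, hi = (x1, x2) if x1 < x2 else (x2, x1)
--     return len({c for c in empty_columns if lo <= c <= hi})
-- ===== Notes on version B (the rewrite author's own statement) =====
-- stated objective: faster
-- what changed: Instead of scanning every integer x in range(x1..x2) and testing list membership (O(range*n)), B makes one pass over empty_columns collecting the distinct values inside [min,max] into a set and returns its size.
import Mathlib
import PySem

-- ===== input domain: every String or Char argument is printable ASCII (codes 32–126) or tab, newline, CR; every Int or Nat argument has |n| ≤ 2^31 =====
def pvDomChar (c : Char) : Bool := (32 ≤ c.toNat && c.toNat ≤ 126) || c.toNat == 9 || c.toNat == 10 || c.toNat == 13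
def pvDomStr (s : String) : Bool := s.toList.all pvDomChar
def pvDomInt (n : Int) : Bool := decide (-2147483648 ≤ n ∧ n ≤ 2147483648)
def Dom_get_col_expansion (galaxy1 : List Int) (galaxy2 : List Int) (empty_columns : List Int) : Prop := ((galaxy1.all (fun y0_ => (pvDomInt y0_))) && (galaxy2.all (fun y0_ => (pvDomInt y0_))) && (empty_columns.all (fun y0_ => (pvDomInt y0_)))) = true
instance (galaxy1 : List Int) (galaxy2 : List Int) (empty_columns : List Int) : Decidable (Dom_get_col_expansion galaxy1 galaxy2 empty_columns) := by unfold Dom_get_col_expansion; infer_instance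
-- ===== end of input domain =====

-- B replaces A's scan of every integer between the two x-coordinates (membership-testing the
-- list each time) by a single pass over empty_columns collecting the distinct values in the
-- interval into a set; objective: faster (one pass over the list instead of range*list work).

-- ===== PORT A =====
def get_col_expansion (galaxy1 : List Int) (galaxy2 : List Int) (empty_columns : List Int) : Int :=
  match PySem.List.pyGet? galaxy1 0, PySem.List.pyGet? galaxy2 0 with
  | some x1, some x2 =>
    if x2 > x1 then
      (PySem.List.pyRange x1 (x2 + 1) 1).foldl
        (fun acc x => if empty_columns.contains x then acc + 1 else acc) 0
    else if x1 > x2 then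
      (PySem.List.pyRange x2 (x1 + 1) 1).foldl
        (fun acc x => if empty_columns.contains x then acc + 1 else acc) 0
    else 0
  | _, _ => 0   -- unreachable under Pre_ (galaxy1[0]/galaxy2[0] raise IndexError)

-- ===== PORT B =====
def get_col_expansion_alt (galaxy1 : List Int) (galaxy2 : List Int) (empty_columns : List Int) : Int :=
  match PySem.List.pyGet? galaxy1 0 with
  | none => 0   -- unreachable under Pre_
  | some x1 =>
    match PySem.List.pyGet? galaxy2 0 with
    | none => 0   -- unreachable under Pre_
    | some x2 =>
      if x1 = x2 then 0
      else
        let lo := if x1 < x2 then x1 else x2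
        let hi := if x1 < x2 then x2 else x1
        ((PySem.Set.ofList (empty_columns.filter (fun c => decide (lo ≤ c) && decide (c ≤ hi)))).length : Int)

-- ===== PRECONDITION & SPEC =====
-- Pre_ excludes exactly the inputs where A raises IndexError: an empty galaxy list.
def Pre_get_col_expansion (galaxy1 : List Int) (galaxy2 : List Int) (empty_columns : List Int) : Prop :=
  galaxy1 ≠ [] ∧ galaxy2 ≠ []
instance (galaxy1 : List Int) (galaxy2 : List Int) (empty_columns : List Int) : Decidable (Pre_get_col_expansion galaxy1 galaxy2 empty_columns) := by unfold Pre_get_col_expansion; infer_instance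

def pvWitness_get_col_expansion : List Int × List Int × List Int := ([1], [5], [2, 4, 4])

def Spec_get_col_expansion (galaxy1 : List Int) (galaxy2 : List Int) (empty_columns : List Int) (out : Int) : Prop := out = get_col_expansion_alt galaxy1 galaxy2 empty_columns
instance (galaxy1 : List Int) (galaxy2 : List Int) (empty_columns : List Int) (out : Int) : Decidable (Spec_get_col_expansion galaxy1 galaxy2 empty_columns out) := by unfold Spec_get_col_expansion; infer_instance

-- ===== CLAIM (what is proved, stated in full; the proofs are below) =====
def Claim_equal_get_col_expansion : Prop := ∀ (galaxy1 : List Int) (galaxy2 : List Int) (empty_columns : List Int), Dom_get_col_expansion galaxy1 galaxy2 empty_columns → Pre_get_col_expansion galaxy1 galaxy2 empty_columns → Spec_get_col_expansion galaxy1 galaxy2 empty_columns (get_col_expansion galaxy1 galaxy2 empty_columns)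

-- ===== LEMMAS AND PROOFS =====

-- Counting range elements that occur in ec = number of distinct ec-elements inside [lo, hi].
theorem count_range_eq_set (lo hi : Int) (ec : List Int) :
    ((PySem.List.pyRange lo (hi + 1) 1).countP (fun x => ec.contains x) : Int)
      = ((PySem.Set.ofList (ec.filter (fun c => decide (lo ≤ c) && decide (c ≤ hi)))).length : Int) := by
  have hperm : ((PySem.List.pyRange lo (hi + 1) 1).filter (fun x => ec.contains x)).Perm
      (PySem.Set.ofList (ec.filter (fun c => decide (lo ≤ c) && decide (c ≤ hi)))) := by
    rw [List.perm_ext_iff_of_nodup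
      ((PySem.List.nodup_pyRange_one lo (hi + 1)).filter _)
      (PySem.Set.nodup_ofList _)]
    intro a
    simp only [List.mem_filter, PySem.Set.mem_ofList, PySem.List.mem_pyRange_one,
      List.contains_iff_mem, decide_eq_true_eq, Bool.and_eq_true]
    constructor
    · rintro ⟨⟨h1, h2⟩, h3⟩; exact ⟨h3, h1, by omega⟩
    · rintro ⟨h3, h1, h2⟩; exact ⟨⟨h1, by omega⟩, h3⟩
  rw [List.countP_eq_length_filter, hperm.length_eq]

theorem get_col_expansion_spec : Claim_equal_get_col_expansion := by
  intro g1 g2 ec _ hpre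
  obtain ⟨h1, h2⟩ := hpre
  obtain ⟨x1, t1, rfl⟩ := List.exists_cons_of_ne_nil h1
  obtain ⟨x2, t2, rfl⟩ := List.exists_cons_of_ne_nil h2
  have e1 : PySem.List.pyGet? (x1 :: t1) 0 = some x1 := by
    simp [PySem.List.pyGet?, PySem.List.pyIdx?]
  have e2 : PySem.List.pyGet? (x2 :: t2) 0 = some x2 := by
    simp [PySem.List.pyGet?, PySem.List.pyIdx?]
  unfold Spec_get_col_expansion get_col_expansion get_col_expansion_alt
  rw [e1, e2]
  dsimp only
  rcases lt_trichotomy x1 x2 with h | h | h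
  · rw [if_pos (show x2 > x1 from h), if_neg (ne_of_lt h)]
    simp only [if_pos h, PySem.List.foldl_count_if, zero_add]
    exact count_range_eq_set x1 x2 ec
  · simp [h]
  · rw [if_neg (by omega : ¬ x2 > x1), if_pos (show x1 > x2 from h), if_neg (ne_of_gt h)]
    simp only [if_neg (by omega : ¬ x1 < x2), PySem.List.foldl_count_if, zero_add]
    exact count_range_eq_set x2 x1 ec
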